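-- pv_equiv track=rewrite | github.com/fkunneman/ADNEXT_events | emotion/plot_total_emotion_in_time_absolute_cbars.py | return_counts
-- ===== SOURCE A (Python) =====
-- def return_counts(bs, d, targets):
--     counts = []
--     ks = d.keys()
--     for timebin in bs:
--         if timebin in ks:
--             bincounts = []
--             for target in targets:
--                 c = d[timebin].count(target)
--                 bincounts.append(c)
--             counts.append(bincounts)
--         else:
--             bincounts = [0] * len(targets)
--             counts.append(bincounts)
--     return counts
-- ===== SOURCE B (Python) =====
-- def return_counts(bs, d, targets):
--     # inverted index: each target value -> all of its column positions
--     pos = {}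
--     for i, t in enumerate(targets):
--         pos.setdefault(t, []).append(i)
--     out = []
--     for b in bs:
--         row = [0] * len(targets)
--         if b in d:
--             for e in d[b]:
--                 for i in pos.get(e, ()):
--                     row[i] += 1
--         out.append(row)
--     return out
-- ===== Notes on version B (the rewrite author's own statement) =====
-- stated objective: alternative
-- what changed: B inverts the data flow: it builds an index from each target value to all of its column positions once, then for each present timebin makes a single pass over the bin's elements incrementing the mapped positions of a zero row, instead of A's per-target .count scan of the bin's element list.
import Mathlib
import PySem

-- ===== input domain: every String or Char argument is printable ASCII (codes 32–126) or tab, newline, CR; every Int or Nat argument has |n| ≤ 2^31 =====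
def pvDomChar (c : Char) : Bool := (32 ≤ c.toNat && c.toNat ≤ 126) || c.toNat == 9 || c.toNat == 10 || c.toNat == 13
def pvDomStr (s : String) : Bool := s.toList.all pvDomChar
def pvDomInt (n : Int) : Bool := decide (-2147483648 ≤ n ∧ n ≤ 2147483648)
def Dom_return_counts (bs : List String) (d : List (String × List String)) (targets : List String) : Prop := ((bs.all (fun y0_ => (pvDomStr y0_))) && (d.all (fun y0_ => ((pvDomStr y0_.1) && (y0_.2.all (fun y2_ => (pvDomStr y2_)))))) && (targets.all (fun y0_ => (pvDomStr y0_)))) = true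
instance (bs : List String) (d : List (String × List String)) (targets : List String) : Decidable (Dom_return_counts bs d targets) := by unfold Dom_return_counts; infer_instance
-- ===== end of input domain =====

-- B inverts the data flow: it builds an index target -> all column positions once, then for each
-- present timebin makes one pass over the bin's elements, incrementing the mapped positions,
-- instead of A's `.count` scan of the bin's list for every target (alternative algorithm).

-- ===== PORT A =====
def return_counts (bs : List String) (d : List (String × List String)) (targets : List String) : List (List Int) :=
  let dd := PySem.Dict.mk d
  let ks := dd.keys
  bs.foldl (fun counts timebin =>
    if ks.contains timebin then
      counts ++ [targets.foldl (fun bincounts target =>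
        bincounts ++ [(PySem.List.count ((dd.get? timebin).getD []) target : Int)]) []]
    else
      counts ++ [List.replicate targets.length (0 : Int)]) []

-- ===== PORT B =====
-- Source B's `for i, t in enumerate(targets)` is ported over `targets.zipIdx` ((t, i) pairs, Nat index);
-- `pos.setdefault(t, []).append(i)` is the in-place update `pos[t] := pos.get(t, []) ++ [i]`;
-- `row[i] += 1` is `row.modify i (· + 1)`.
def return_counts_alt (bs : List String) (d : List (String × List String)) (targets : List String) : List (List Int) :=
  let dd := PySem.Dict.mk d
  let pos := targets.zipIdx.foldl
      (fun p it => p.insert it.1 (p.getD it.1 [] ++ [it.2]))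
      (PySem.Dict.empty : PySem.Dict String (List Nat))
  bs.foldl (fun out b =>
    let row0 := List.replicate targets.length (0 : Int)
    let row := if dd.contains b then
        ((dd.get? b).getD []).foldl (fun r e =>
          (pos.getD e []).foldl (fun r i => r.modify i (· + 1)) r) row0
      else row0
    out ++ [row]) []

-- ===== PRECONDITION & SPEC =====
def Spec_return_counts (bs : List String) (d : List (String × List String)) (targets : List String) (out : List (List Int)) : Prop := out = return_counts_alt bs d targets
instance (bs : List String) (d : List (String × List String)) (targets : List String) (out : List (List Int)) : Decidable (Spec_return_counts bs d targets out) := by unfold Spec_return_counts; infer_instance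

-- ===== CLAIM (what is proved, stated in full; the proofs are below) =====
def Claim_equal_return_counts : Prop := ∀ (bs : List String) (d : List (String × List String)) (targets : List String), Dom_return_counts bs d targets → Spec_return_counts bs d targets (return_counts bs d targets)

-- ===== LEMMAS AND PROOFS =====

-- the index built by B maps t to the positions of t (in order): fold characterization
theorem pv_pos_getD (l : List (String × Nat)) (acc : PySem.Dict String (List Nat)) (t : String) :
    (l.foldl (fun p it => p.insert it.1 (p.getD it.1 [] ++ [it.2])) acc).getD t []
      = acc.getD t [] ++ (l.filter (fun it => it.1 == t)).map (·.2) := by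
  induction l generalizing acc with
  | nil => simp
  | cons x xs ih =>
    simp only [List.foldl_cons, List.filter_cons]
    rw [ih]
    by_cases hx : x.1 = t
    · simp [hx]
    · simp [PySem.Dict.getD_insert, hx, Ne.symm hx]

-- how often position j occurs among t's positions in ts.zipIdx n
theorem pv_count_idx (ts : List String) (j : Nat) (t : String) : ∀ n : Nat,
    (((ts.zipIdx n).filter (fun it => it.1 == t)).map (·.2)).count j
      = if n ≤ j ∧ ts[j - n]? = some t then 1 else 0 := by
  induction ts with
  | nil => intro n; simp
  | cons x xs ih =>
    intro n
    simp only [List.zipIdx_cons, List.filter_cons]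
    by_cases hx : x = t
    · rw [if_pos (by simp [hx])]
      simp only [List.map_cons, List.count_cons, ih (n + 1)]
      by_cases hj : j = n
      · simp [hj, hx, show ¬ (n + 1 ≤ n) by omega]
      · by_cases hle : n ≤ j
        · have h2 : j - n = (j - (n + 1)) + 1 := by omega
          simp [Ne.symm hj, h2, hle, show n + 1 ≤ j by omega]
        · simp [Ne.symm hj, show ¬ (n + 1 ≤ j) by omega, hle]
    · rw [if_neg (by simp [hx])]
      rw [ih (n + 1)]
      by_cases hj : j = n
      · simp [hj, show ¬ (n + 1 ≤ n) by omega, hx]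
      · by_cases hle : n ≤ j
        · have h2 : j - n = (j - (n + 1)) + 1 := by omega
          simp [h2, hle, show n + 1 ≤ j by omega]
        · simp [show ¬ (n + 1 ≤ j) by omega, hle]

-- incrementing at every index of `is` adds the multiplicity of j at slot j
theorem pv_foldl_modify (is : List Nat) (r : List Int) (j : Nat) :
    (is.foldl (fun r i => r.modify i (· + 1)) r)[j]?
      = r[j]?.map (· + (is.count j : Int)) := by
  induction is generalizing r with
  | nil => simp [Option.map_id']
  | cons i is ih =>
    simp only [List.foldl_cons, ih, List.getElem?_modify, List.count_cons]
    cases r[j]? with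
    | none => simp
    | some v =>
      by_cases hij : i = j
      · simp [hij]
        ring
      · simp [hij, show ¬ (i == j) = true by simp [hij]]

-- one pass over elems through the index: slot j gains the number of elems equal to targets[j]
theorem pv_row_getElem (ts : List String) (elems : List String) (r : List Int) (j : Nat) :
    (elems.foldl (fun r e =>
        ((ts.zipIdx.foldl (fun p it => p.insert it.1 (p.getD it.1 [] ++ [it.2]))
          (PySem.Dict.empty : PySem.Dict String (List Nat))).getD e []).foldl
          (fun r i => r.modify i (· + 1)) r) r)[j]?
      = r[j]?.map (· + (elems.countP (fun e => ts[j]? == some e) : Int)) := by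
  induction elems generalizing r with
  | nil => simp [Option.map_id']
  | cons e es ih =>
    rw [List.foldl_cons, ih, pv_foldl_modify, pv_pos_getD, PySem.Dict.getD_empty,
        List.nil_append, pv_count_idx ts j e 0]
    simp only [Nat.zero_le, true_and, Nat.sub_zero, List.countP_cons]
    cases r[j]? with
    | none => simp
    | some v =>
      by_cases hj : ts[j]? = some e
      · simp only [hj, Option.map_some, Option.some.injEq,
          show (some e == some e) = true by simp]  -- counted: this element matches
        push_cast
        ring
      · simp only [if_neg hj, show (ts[j]? == some e) = false by simp [hj],
          Option.map_some, Option.some.injEq, Bool.false_eq_true, if_false]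
        push_cast
        ring

-- the whole row for a present bin equals A's per-target count row
theorem pv_row_eq (ts : List String) (elems : List String) :
    (elems.foldl (fun r e =>
        ((ts.zipIdx.foldl (fun p it => p.insert it.1 (p.getD it.1 [] ++ [it.2]))
          (PySem.Dict.empty : PySem.Dict String (List Nat))).getD e []).foldl
          (fun r i => r.modify i (· + 1)) r) (List.replicate ts.length (0 : Int)))
      = ts.map (fun t => (PySem.List.count elems t : Int)) := by
  apply List.ext_getElem?
  intro j
  rw [pv_row_getElem, List.getElem?_map, List.getElem?_replicate]
  cases hj : ts[j]? with
  | none =>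
    have hlen : ts.length ≤ j := List.getElem?_eq_none_iff.mp hj
    simp [show ¬ j < ts.length by omega]
  | some t =>
    have hlt : j < ts.length := by
      by_contra h
      rw [List.getElem?_eq_none_iff.mpr (by omega)] at hj
      simp at hj
    simp only [if_pos hlt, Option.map_some, Option.some.injEq, zero_add]
    simp only [PySem.List.count, List.count]
    congr 1
    apply List.countP_congr
    intro e _
    simp [@eq_comm String t]

-- ===== VERDICT (by name: the statement is the Claim_ definition above) =====
theorem return_counts_spec : Claim_equal_return_counts := by
  intro bs d targets _
  show return_counts bs d targets = return_counts_alt bs d targets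
  simp only [return_counts, return_counts_alt]
  rw [show (fun (counts : List (List Int)) (timebin : String) =>
      if (PySem.Dict.mk d).keys.contains timebin then
        counts ++ [targets.foldl (fun bincounts target =>
          bincounts ++ [(PySem.List.count (((PySem.Dict.mk d).get? timebin).getD []) target : Int)]) []]
      else counts ++ [List.replicate targets.length (0 : Int)])
      = fun counts timebin => counts ++ [(if (PySem.Dict.mk d).keys.contains timebin then
          targets.foldl (fun bincounts target =>
            bincounts ++ [(PySem.List.count (((PySem.Dict.mk d).get? timebin).getD []) target : Int)]) []
        else List.replicate targets.length (0 : Int))] from by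
      funext counts timebin; split <;> rfl]
  rw [PySem.List.foldl_append_singleton_eq_map, PySem.List.foldl_append_singleton_eq_map]
  simp only [List.nil_append]
  apply List.map_congr_left
  intro b _
  have hc : (PySem.Dict.mk d).keys.contains b = (PySem.Dict.mk d).contains b := by
    rw [PySem.Dict.contains_eq_isSome_get?, ← PySem.Dict.contains_eq_isSome_get?,
        PySem.Dict.contains_eq_decide_mem_keys]
    simp
  rw [hc]
  cases hcb : (PySem.Dict.mk d).contains b with
  | false => simp
  | true =>
    simp only [if_true]
    rw [PySem.List.foldl_append_singleton_eq_map]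
    simp only [List.nil_append]
    exact (pv_row_eq targets (((PySem.Dict.mk d).get? b).getD [])).symm
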